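-- pv_equiv track=rewrite | github.com/tjcsl/ion | intranet/apps/printing/views.py | parse_alerts
-- ===== SOURCE A (Python) =====
-- from typing import Dict, List, Optional, Tuple
--
-- def parse_alerts(alerts: str) -> Tuple[str, str]:
--     known_alerts = {
--         "paused": "unavailable",
--         "media-empty-error": "out of paper",
--         "media-empty-warning": "out of paper",
--         "media-jam-error": "jammed",
--         "media-jam-warning": "jammed",
--         "toner-empty-error": "out of toner",
--         "toner-empty-warning": "out of toner",
--         "none": "working",
--     }
--     alerts = alerts.split()
--     alerts_text = ", ".join(known_alerts.get(alert, "error") for alert in alerts)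
--     error_alerts = ["paused"]
--     broken_alerts = ["media-empty-error", "media-empty-warning", "media-jam-error", "media-jam-warning", "toner-empty-warning", "toner-empty-error"]
--     printer_class = "working"
--     for alert in alerts:
--         if alert in error_alerts or alert not in known_alerts:
--             printer_class = "error"
--             break
--         if alert in broken_alerts:
--             printer_class = "broken"
--     return alerts_text, printer_class
-- ===== SOURCE B (Python) =====
-- def parse_alerts(alerts):
--     known_alerts = {
--         "paused": "unavailable",
--         "media-empty-error": "out of paper",
--         "media-empty-warning": "out of paper",
--         "media-jam-error": "jammed",
--         "media-jam-warning": "jammed",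
--         "toner-empty-error": "out of toner",
--         "toner-empty-warning": "out of toner",
--         "none": "working",
--     }
--     broken_alerts = {"media-empty-error", "media-empty-warning", "media-jam-error",
--                      "media-jam-warning", "toner-empty-warning", "toner-empty-error"}
--     tokens = alerts.split()
--     alerts_text = ", ".join(known_alerts.get(a, "error") for a in tokens)
--     present = set(tokens)
--     if "paused" in present or not present <= known_alerts.keys():
--         printer_class = "error"
--     elif present & broken_alerts:
--         printer_class = "broken"
--     else:
--         printer_class = "working"
--     return alerts_text, printer_class
-- ===== Notes on version B (the rewrite author's own statement) =====
-- stated objective: alternative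
-- what changed: A's per-token mutable printer_class loop with early break is replaced by set algebra on the distinct tokens: build present = set(tokens) once, then decide the class by a membership test ('paused' in present), a subset test against the known-alert keys, and a set intersection with the broken alerts, with no scan of the token list for the class at all.
import Mathlib
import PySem

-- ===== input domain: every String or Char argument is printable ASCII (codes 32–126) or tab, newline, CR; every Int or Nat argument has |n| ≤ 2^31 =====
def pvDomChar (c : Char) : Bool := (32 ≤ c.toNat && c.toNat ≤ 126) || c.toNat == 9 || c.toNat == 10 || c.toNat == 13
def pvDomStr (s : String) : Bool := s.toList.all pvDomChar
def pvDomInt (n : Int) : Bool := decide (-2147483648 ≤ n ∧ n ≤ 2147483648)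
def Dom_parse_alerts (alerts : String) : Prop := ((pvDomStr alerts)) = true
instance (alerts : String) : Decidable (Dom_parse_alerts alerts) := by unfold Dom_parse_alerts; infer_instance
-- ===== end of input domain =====

-- B replaces A's per-token mutable-flag loop by set algebra on the distinct tokens
-- (membership / subset / intersection tests); objective: alternative decomposition.

-- ===== PORT A =====
def pvKnownA : PySem.Dict String String :=
  PySem.Dict.ofList [("paused", "unavailable"),
    ("media-empty-error", "out of paper"), ("media-empty-warning", "out of paper"),
    ("media-jam-error", "jammed"), ("media-jam-warning", "jammed"),
    ("toner-empty-error", "out of toner"), ("toner-empty-warning", "out of toner"),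
    ("none", "working")]

def pvErrorAlertsA : List String := ["paused"]

def pvBrokenA : List String :=
  ["media-empty-error", "media-empty-warning", "media-jam-error",
   "media-jam-warning", "toner-empty-warning", "toner-empty-error"]

-- A's for-loop over the tokens: mutable printer_class, break on the error case.
def pvClassLoopA : List String → String → String
  | [], printerClass => printerClass
  | alert :: rest, printerClass =>
    if pvErrorAlertsA.contains alert || !(pvKnownA.contains alert) then "error"
    else if pvBrokenA.contains alert then pvClassLoopA rest "broken"
    else pvClassLoopA rest printerClass

def parse_alerts (alerts : String) : String × String :=
  let toks := PySem.Str.split₀ alerts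
  let alertsText := PySem.Str.join ", " (toks.map (fun a => pvKnownA.getD a "error"))
  (alertsText, pvClassLoopA toks "working")

-- ===== PORT B =====
def pvKnownB : PySem.Dict String String :=
  PySem.Dict.ofList [("paused", "unavailable"),
    ("media-empty-error", "out of paper"), ("media-empty-warning", "out of paper"),
    ("media-jam-error", "jammed"), ("media-jam-warning", "jammed"),
    ("toner-empty-error", "out of toner"), ("toner-empty-warning", "out of toner"),
    ("none", "working")]

def pvBrokenB : PySem.Set String :=
  PySem.Set.ofList ["media-empty-error", "media-empty-warning", "media-jam-error",
    "media-jam-warning", "toner-empty-warning", "toner-empty-error"]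

def parse_alerts_alt (alerts : String) : String × String :=
  let tokens := PySem.Str.split₀ alerts
  let alertsText := PySem.Str.join ", " (tokens.map (fun a => pvKnownB.getD a "error"))
  let present : PySem.Set String := PySem.Set.ofList tokens
  let printerClass :=
    if PySem.Set.contains present "paused" || !(PySem.Set.issubset present pvKnownB.keys) then "error"
    else if !(PySem.Set.inter present pvBrokenB).isEmpty then "broken"
    else "working"
  (alertsText, printerClass)

-- ===== PRECONDITION & SPEC =====
def Spec_parse_alerts (alerts : String) (out : String × String) : Prop := out = parse_alerts_alt alerts
instance (alerts : String) (out : String × String) : Decidable (Spec_parse_alerts alerts out) := by unfold Spec_parse_alerts; infer_instance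

-- ===== CLAIM (what is proved, stated in full; the proofs are below) =====
def Claim_equal_parse_alerts : Prop := ∀ (alerts : String), Dom_parse_alerts alerts → Spec_parse_alerts alerts (parse_alerts alerts)

-- ===== LEMMAS AND PROOFS =====

def pvErrCond (a : String) : Bool := pvErrorAlertsA.contains a || !(pvKnownA.contains a)

theorem pvKnown_eq : pvKnownB = pvKnownA := rfl

-- A's loop in closed form: "error" if any token hits the error case, else "broken" if any
-- token is a broken alert, else the start flag.
theorem pvLoop_char (toks : List String) (s : String) :
    pvClassLoopA toks s =
      if toks.any pvErrCond then "error"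
      else if toks.any pvBrokenA.contains then "broken" else s := by
  induction toks generalizing s with
  | nil => rfl
  | cons a rest ih =>
      simp only [pvClassLoopA, List.any_cons]
      rcases he : (pvErrorAlertsA.contains a || !(pvKnownA.contains a)) with _ | _
      · have hE : pvErrCond a = false := by simpa [pvErrCond] using he
        simp only [hE, Bool.false_or, Bool.false_eq_true, if_false]
        by_cases hb : pvBrokenA.contains a = true
        · simp only [hb, Bool.true_or]
          rw [ih "broken"]
          split_ifs <;> rfl
        · rw [Bool.not_eq_true] at hb
          simp only [hb, Bool.false_or, Bool.false_eq_true, if_false]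
          exact ih s
      · have hE : pvErrCond a = true := by simpa [pvErrCond] using he
        simp [hE]

theorem pvErr_agree (toks : List String) :
    (PySem.Set.contains (PySem.Set.ofList toks) "paused"
      || !(PySem.Set.issubset (PySem.Set.ofList toks) pvKnownB.keys))
      = toks.any pvErrCond := by
  rcases h : toks.any pvErrCond with _ | _
  · -- no token is an error token: "paused" absent and every token a known key
    have hall := h
    simp only [List.any_eq_false, pvErrCond, Bool.or_eq_true, Bool.not_eq_true',
      not_or] at hall
    have hp : PySem.Set.contains (PySem.Set.ofList toks) "paused" = false := by
      rw [Bool.eq_false_iff]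
      intro hc
      have := (PySem.Set.mem_ofList toks "paused").mp
        ((PySem.Set.contains_iff _ _).mp hc)
      have h2 := (hall _ this).1
      simp [pvErrorAlertsA] at h2
    have hsub : PySem.Set.issubset (PySem.Set.ofList toks) pvKnownB.keys = true := by
      rw [PySem.Set.issubset_iff]
      intro x hx
      have hx' := (PySem.Set.mem_ofList toks x).mp hx
      have hk : pvKnownA.contains x = true := by
        have := (hall _ hx').2
        simpa using this
      rw [← pvKnown_eq] at hk
      exact (PySem.Dict.contains_iff_mem_keys _ _).mp hk
    rw [hp, hsub]
    rfl
  · -- some token is an error token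
    have hex := h
    simp only [List.any_eq_true, pvErrCond, Bool.or_eq_true] at hex
    obtain ⟨x, hx, hcase⟩ := hex
    rcases hcase with hpause | hunk
    · have hx' : x = "paused" := by
        simpa [pvErrorAlertsA] using hpause
      have : PySem.Set.contains (PySem.Set.ofList toks) "paused" = true := by
        rw [PySem.Set.contains_iff, PySem.Set.mem_ofList]
        exact hx' ▸ hx
      rw [this]
      rfl
    · have : PySem.Set.issubset (PySem.Set.ofList toks) pvKnownB.keys = false := by
        rw [Bool.eq_false_iff]
        intro hsub
        rw [PySem.Set.issubset_iff] at hsub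
        have hmem := hsub x ((PySem.Set.mem_ofList toks x).mpr hx)
        have : pvKnownB.contains x = true :=
          (PySem.Dict.contains_iff_mem_keys _ _).mpr hmem
        rw [pvKnown_eq] at this
        rw [Bool.not_eq_true'] at hunk
        rw [this] at hunk
        exact Bool.true_eq_false.mp hunk
      simp only [this, Bool.not_false, Bool.or_true]

theorem pvBroken_agree (toks : List String) :
    (!(PySem.Set.inter (PySem.Set.ofList toks) pvBrokenB).isEmpty)
      = toks.any pvBrokenA.contains := by
  rcases h : toks.any pvBrokenA.contains with _ | _
  · have hall := h
    simp only [List.any_eq_false] at hall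
    have : PySem.Set.inter (PySem.Set.ofList toks) pvBrokenB = [] := by
      rw [List.eq_nil_iff_forall_not_mem]
      intro x hx
      rw [PySem.Set.mem_inter] at hx
      obtain ⟨hx1, hx2⟩ := hx
      have hx1' := (PySem.Set.mem_ofList toks x).mp hx1
      have hx2' : x ∈ pvBrokenA :=
        (PySem.Set.mem_ofList pvBrokenA x).mp hx2
      have hcon := hall _ hx1'
      exact hcon (List.contains_iff_mem.mpr hx2')
    rw [this]
    rfl
  · have hex := h
    simp only [List.any_eq_true] at hex
    obtain ⟨x, hx, hb⟩ := hex
    have hmem : x ∈ PySem.Set.inter (PySem.Set.ofList toks) pvBrokenB := by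
      rw [PySem.Set.mem_inter]
      exact ⟨(PySem.Set.mem_ofList toks x).mpr hx,
        (PySem.Set.mem_ofList pvBrokenA x).mpr (List.contains_iff_mem.mp hb)⟩
    have hne : PySem.Set.inter (PySem.Set.ofList toks) pvBrokenB ≠ [] :=
      fun hnil => by simp [hnil] at hmem
    simp [hne]

-- ===== VERDICT (by name: the statement is the Claim_ definition above) =====
theorem parse_alerts_spec : Claim_equal_parse_alerts := by
  intro alerts _
  unfold Spec_parse_alerts parse_alerts parse_alerts_alt
  refine Prod.ext rfl ?_
  simp only
  rw [pvLoop_char, pvErr_agree, pvBroken_agree]
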